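-- pv_equiv track=rewrite | github.com/jwestrob/Sharur | sharur/predicates/topology.py | _parse_tm_positions
-- ===== SOURCE A (Python) =====
-- def _parse_tm_positions(annotation: str) -> list[tuple[int, int]]:
--     """
--     Parse TM helix positions from annotation string.
--
--     Args:
--         annotation: String of 'M', 'i', 'o' characters (one per residue)
--
--     Returns:
--         List of (start, end) tuples for each TM helix (1-indexed)
--     """
--     positions = []
--     in_helix = False
--     start = 0
--
--     for i, char in enumerate(annotation):
--         if char == 'M' and not in_helix:
--             # Start of new TM helix
--             in_helix = True
--             start = i + 1  # 1-indexed
--         elif char != 'M' and in_helix: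
--             # End of TM helix
--             in_helix = False
--             positions.append((start, i))  # end is exclusive, so i (not i+1)
--
--     # Handle case where sequence ends in TM helix
--     if in_helix:
--         positions.append((start, len(annotation)))
--
--     return positions
-- ===== SOURCE B (Python) =====
-- def _parse_tm_positions(annotation: str) -> list[tuple[int, int]]:
--     """Scan for maximal runs of 'M': jump the index over each run, no flag state."""
--     positions = []
--     i = 0
--     n = len(annotation)
--     while i < n:
--         if annotation[i] != 'M':
--             i += 1
--         else:
--             j = i + 1
--             while j < n and annotation[j] == 'M':
--                 j += 1
--             positions.append((i + 1, j))
--             i = j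
--     return positions
-- ===== Notes on version B (the rewrite author's own statement) =====
-- stated objective: simpler
-- what changed: Replaces the in_helix/start flag state machine (with its trailing-helix special case) by an index loop that jumps over each maximal membrane-residue run and emits its 1-indexed start and exclusive end directly.
import Mathlib
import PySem

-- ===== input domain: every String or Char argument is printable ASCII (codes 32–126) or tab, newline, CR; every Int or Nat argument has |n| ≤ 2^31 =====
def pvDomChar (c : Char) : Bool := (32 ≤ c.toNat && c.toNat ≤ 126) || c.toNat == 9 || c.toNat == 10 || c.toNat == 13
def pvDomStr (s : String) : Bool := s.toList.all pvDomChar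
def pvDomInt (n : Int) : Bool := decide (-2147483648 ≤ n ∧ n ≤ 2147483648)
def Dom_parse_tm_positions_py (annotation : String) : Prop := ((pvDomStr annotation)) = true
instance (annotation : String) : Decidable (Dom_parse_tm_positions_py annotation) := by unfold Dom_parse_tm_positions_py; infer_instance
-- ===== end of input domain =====

-- B replaces A's in_helix/start flag state machine (and trailing-helix special case)
-- by an index loop that jumps over each maximal run of 'M'; objective: simpler.


-- ===== PORT A =====
-- the for-loop over enumerate(annotation), state (positions, in_helix, start)
def pvLoopA : List Char → Nat → List (Int × Int) → Bool → Int → List (Int × Int) × Bool × Int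
  | [], _, pos, inh, st => (pos, inh, st)
  | c :: cs, i, pos, inh, st =>
    if c = 'M' ∧ inh = false then
      pvLoopA cs (i + 1) pos true ((i : Int) + 1)
    else if c ≠ 'M' ∧ inh = true then
      pvLoopA cs (i + 1) (pos ++ [(st, (i : Int))]) false st
    else
      pvLoopA cs (i + 1) pos inh st

def parse_tm_positions_py (annotation : String) : List (Int × Int) :=
  let r := pvLoopA annotation.toList 0 [] false 0
  if r.2.1 = true then r.1 ++ [(r.2.2, (annotation.toList.length : Int))] else r.1

-- ===== PORT B =====
-- inner while: advance j over the run of 'M's, return (first non-M index, remaining chars)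
def pvRunEnd : List Char → Nat → Nat × List Char
  | [], j => (j, [])
  | c :: cs, j => if c = 'M' then pvRunEnd cs (j + 1) else (j, c :: cs)

lemma pvRunEnd_len : ∀ (cs : List Char) (j : Nat), (pvRunEnd cs j).2.length ≤ cs.length := by
  intro cs
  induction cs with
  | nil => intro j; simp [pvRunEnd]
  | cons c cs ih =>
    intro j
    by_cases h : c = 'M' <;> simp [pvRunEnd, h]
    · exact le_trans (ih (j + 1)) (Nat.le_succ _)

-- outer while: skip non-'M', else emit the run (i+1, j) and jump to j
def pvRuns (cs : List Char) (i : Nat) : List (Int × Int) :=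
  match cs with
  | [] => []
  | c :: rest =>
    if c = 'M' then
      (((i : Int) + 1), ((pvRunEnd rest (i + 1)).1 : Int))
        :: pvRuns (pvRunEnd rest (i + 1)).2 (pvRunEnd rest (i + 1)).1
    else
      pvRuns rest (i + 1)
termination_by cs.length
decreasing_by
  · exact Nat.lt_succ_of_le (pvRunEnd_len rest (i + 1))
  · simp

def parse_tm_positions_py_alt (annotation : String) : List (Int × Int) :=
  pvRuns annotation.toList 0

-- ===== PRECONDITION & SPEC =====
def Spec_parse_tm_positions_py (annotation : String) (out : List (Int × Int)) : Prop := out = parse_tm_positions_py_alt annotation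
instance (annotation : String) (out : List (Int × Int)) : Decidable (Spec_parse_tm_positions_py annotation out) := by unfold Spec_parse_tm_positions_py; infer_instance

-- ===== CLAIM (what is proved, stated in full; the proofs are below) =====
def Claim_equal_parse_tm_positions_py : Prop := ∀ (annotation : String), Dom_parse_tm_positions_py annotation → Spec_parse_tm_positions_py annotation (parse_tm_positions_py annotation)

-- ===== LEMMAS AND PROOFS =====

-- A's loop followed by the trailing-helix fix-up, as a function of the remaining input
def pvFinA (cs : List Char) (i : Nat) (pos : List (Int × Int)) (inh : Bool) (st : Int) : List (Int × Int) :=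
  let r := pvLoopA cs i pos inh st
  if r.2.1 = true then r.1 ++ [(r.2.2, ((i + cs.length : Nat) : Int))] else r.1

lemma pvFin_runs : ∀ (cs : List Char) (i : Nat) (pos : List (Int × Int)) (st : Int),
    pvFinA cs i pos false st = pos ++ pvRuns cs i ∧
    pvFinA cs i pos true st
      = pos ++ ((st, ((pvRunEnd cs i).1 : Int)) :: pvRuns (pvRunEnd cs i).2 (pvRunEnd cs i).1) := by
  intro cs
  induction cs with
  | nil =>
    intro i pos st
    constructor
    · simp [pvFinA, pvLoopA, pvRuns]
    · simp [pvFinA, pvLoopA, pvRunEnd, pvRuns]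
  | cons c cs ih =>
    intro i pos st
    have hlen : i + (cs.length + 1) = (i + 1) + cs.length := by omega
    by_cases h : c = 'M'
    · refine ⟨?_, ?_⟩
      · have h2 := (ih (i + 1) pos ((i : Int) + 1)).2
        simp only [pvFinA, List.length_cons, hlen] at h2 ⊢
        simpa [pvLoopA, pvRuns, h] using h2
      · have h2 := (ih (i + 1) pos st).2
        simp only [pvFinA, List.length_cons, hlen] at h2 ⊢
        simpa [pvLoopA, pvRunEnd, h] using h2
    · refine ⟨?_, ?_⟩
      · have h1 := (ih (i + 1) pos st).1
        simp only [pvFinA, List.length_cons, hlen] at h1 ⊢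
        simpa [pvLoopA, pvRuns, h] using h1
      · have h1 := (ih (i + 1) (pos ++ [(st, (i : Int))]) st).1
        simp only [pvFinA, List.length_cons, hlen] at h1 ⊢
        simpa [pvLoopA, pvRunEnd, pvRuns, h] using h1

-- ===== VERDICT (by name: the statement is the Claim_ definition above) =====
theorem parse_tm_positions_py_spec : Claim_equal_parse_tm_positions_py := by
  intro annotation _
  unfold Spec_parse_tm_positions_py parse_tm_positions_py parse_tm_positions_py_alt
  have h := (pvFin_runs annotation.toList 0 [] 0).1
  simpa [pvFinA] using h
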